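-- pv_equiv track=rewrite | github.com/sreyaku2003-ctrl/langconv | app.py | clean_sql_input
-- ===== SOURCE A (Python) =====
-- def clean_sql_input(sql_text):
--     """Remove SQL Server metadata and prepare for conversion"""
--     # Remove everything before CREATE PROCEDURE
--     lines = sql_text.splitlines()
--     cleaned_lines = []
--     found_create = False
--
--     for line in lines:
--         stripped = line.strip().lower()
--         if not found_create:
--             if stripped.startswith(("create procedure", "create proc", "alter procedure", "alter proc")):
--                 found_create = True
--                 cleaned_lines.append(line)
--         else:
--             if stripped not in ("go", ""):
--                 cleaned_lines.append(line)
--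
--     return "\n".join(cleaned_lines)
-- ===== SOURCE B (Python) =====
-- def clean_sql_input(sql_text):
--     """Remove SQL Server metadata and prepare for conversion"""
--     prefixes = ("create procedure", "create proc", "alter procedure", "alter proc")
--     # Phase 1: drop every GO/blank line from the whole input.
--     body = [l for l in sql_text.splitlines() if l.strip().lower() not in ("go", "")]
--     # Phase 2: pop leading lines until a CREATE/ALTER PROC[EDURE] line surfaces.
--     while body and not body[0].strip().lower().startswith(prefixes):
--         body.pop(0)
--     return "\n".join(body)
-- ===== Notes on version B (the rewrite author's own statement) =====
-- stated objective: simpler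
-- what changed: Reverses A's phase order and removes the head special-case: B first filters go/blank lines out of the whole input, then pops leading lines until a CREATE/ALTER line surfaces; correctness rests on the filter commuting with the prefix drop because a CREATE line is never go/blank.
import Mathlib
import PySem

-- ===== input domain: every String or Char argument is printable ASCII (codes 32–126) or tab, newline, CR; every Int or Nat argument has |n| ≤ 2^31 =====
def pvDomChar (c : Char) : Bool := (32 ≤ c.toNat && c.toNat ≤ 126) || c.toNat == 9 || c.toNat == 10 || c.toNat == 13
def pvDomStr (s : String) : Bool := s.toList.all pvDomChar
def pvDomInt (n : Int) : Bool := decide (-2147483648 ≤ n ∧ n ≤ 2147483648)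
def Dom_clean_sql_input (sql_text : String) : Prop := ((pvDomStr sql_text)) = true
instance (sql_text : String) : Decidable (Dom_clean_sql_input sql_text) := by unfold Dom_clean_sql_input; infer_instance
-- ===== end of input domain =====

-- B reverses A's phase order: filter all go/blank lines first, then pop the leading lines
-- until a CREATE/ALTER line surfaces (no head special-case); simpler, same cost.

-- ===== PORT A =====
-- A's for-loop with the found_create flag and the cleaned_lines accumulator, as a foldl
def clean_sql_input (sql_text : String) : String :=
  let lines := PySem.Str.splitlines sql_text
  let st := lines.foldl (fun (st : List String × Bool) line =>
    let stripped := PySem.Str.lower (PySem.Str.strip line)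
    if st.2 = false then
      if PySem.Str.startswith stripped "create procedure" ||
         PySem.Str.startswith stripped "create proc" ||
         PySem.Str.startswith stripped "alter procedure" ||
         PySem.Str.startswith stripped "alter proc" then
        (st.1 ++ [line], true)
      else st
    else
      if !(stripped == "go" || stripped == "") then (st.1 ++ [line], st.2) else st)
    ([], false)
  PySem.Str.join "\n" st.1

-- ===== PORT B =====
-- Source B's filter comprehension predicate: the line is not go/blank
def pvKeepLine (line : String) : Bool :=
  let stripped := PySem.Str.lower (PySem.Str.strip line)
  !(stripped == "go" || stripped == "")

-- Source B's prefix test on body[0]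
def pvIsCreateLine (line : String) : Bool :=
  let stripped := PySem.Str.lower (PySem.Str.strip line)
  PySem.Str.startswith stripped "create procedure" ||
  PySem.Str.startswith stripped "create proc" ||
  PySem.Str.startswith stripped "alter procedure" ||
  PySem.Str.startswith stripped "alter proc"

-- Source B's 'while body and not body[0]...: body.pop(0)' loop
def pvPopUntilCreate : List String → List String
  | [] => []
  | l :: rest => if !(pvIsCreateLine l) then pvPopUntilCreate rest else l :: rest

def clean_sql_input_alt (sql_text : String) : String :=
  let body := (PySem.Str.splitlines sql_text).filter pvKeepLine
  PySem.Str.join "\n" (pvPopUntilCreate body)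

-- ===== PRECONDITION & SPEC =====
def Spec_clean_sql_input (sql_text : String) (out : String) : Prop := out = clean_sql_input_alt sql_text
instance (sql_text : String) (out : String) : Decidable (Spec_clean_sql_input sql_text out) := by unfold Spec_clean_sql_input; infer_instance

-- ===== CLAIM =====
def Claim_equal_clean_sql_input : Prop := ∀ (sql_text : String), Dom_clean_sql_input sql_text → Spec_clean_sql_input sql_text (clean_sql_input sql_text)

-- ===== LEMMAS AND PROOFS =====

-- A's loop body, named for the proofs
def pvStepA (st : List String × Bool) (line : String) : List String × Bool :=
  let stripped := PySem.Str.lower (PySem.Str.strip line)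
  if st.2 = false then
    if PySem.Str.startswith stripped "create procedure" ||
       PySem.Str.startswith stripped "create proc" ||
       PySem.Str.startswith stripped "alter procedure" ||
       PySem.Str.startswith stripped "alter proc" then
      (st.1 ++ [line], true)
    else st
  else
    if !(stripped == "go" || stripped == "") then (st.1 ++ [line], st.2) else st

-- a CREATE/ALTER line is never go/blank, so phase 1 of B keeps it
lemma pvCreate_keep (l : String) (h : pvIsCreateLine l = true) : pvKeepLine l = true := by
  unfold pvIsCreateLine at h
  unfold pvKeepLine
  by_cases hgo : PySem.Str.lower (PySem.Str.strip l) = "go"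
  · rw [hgo] at h; exact absurd h (by decide)
  · by_cases hbl : PySem.Str.lower (PySem.Str.strip l) = ""
    · rw [hbl] at h; exact absurd h (by decide)
    · simp [hgo, hbl]

-- after the flag is set, A just filters with pvKeepLine
lemma pvFoldTrue (lines : List String) (acc : List String) :
    lines.foldl pvStepA (acc, true) = (acc ++ lines.filter pvKeepLine, true) := by
  induction lines generalizing acc with
  | nil => simp
  | cons l rest ih =>
    have hk : (!(PySem.Str.lower (PySem.Str.strip l) == "go" ||
        PySem.Str.lower (PySem.Str.strip l) == "")) = pvKeepLine l := rfl
    simp only [List.foldl_cons, pvStepA, hk]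
    cases h : pvKeepLine l
    · simp [h, ih, List.filter_cons]
    · simp [h, ih, List.filter_cons]

-- A's whole fold equals B's filter-then-pop pipeline
lemma pvFoldFalse (lines : List String) (acc : List String) :
    (lines.foldl pvStepA (acc, false)).1 =
      acc ++ pvPopUntilCreate (lines.filter pvKeepLine) := by
  induction lines generalizing acc with
  | nil => simp [pvPopUntilCreate]
  | cons l rest ih =>
    have hk : (PySem.Str.startswith (PySem.Str.lower (PySem.Str.strip l)) "create procedure" ||
        PySem.Str.startswith (PySem.Str.lower (PySem.Str.strip l)) "create proc" ||
        PySem.Str.startswith (PySem.Str.lower (PySem.Str.strip l)) "alter procedure" ||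
        PySem.Str.startswith (PySem.Str.lower (PySem.Str.strip l)) "alter proc") =
        pvIsCreateLine l := rfl
    simp only [List.foldl_cons, pvStepA, hk, List.filter_cons]
    cases h : pvIsCreateLine l
    · simp only [Bool.false_eq_true, if_false, if_pos rfl]
      cases hkp : pvKeepLine l
      · simpa [hkp] using ih acc
      · simpa [hkp, pvPopUntilCreate, h] using ih acc
    · simp [pvCreate_keep l h, pvPopUntilCreate, h, pvFoldTrue]

-- ===== VERDICT =====
theorem clean_sql_input_spec : Claim_equal_clean_sql_input := by
  intro s _
  unfold Spec_clean_sql_input clean_sql_input clean_sql_input_alt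
  have h := pvFoldFalse (PySem.Str.splitlines s) []
  simp only [List.nil_append] at h
  show PySem.Str.join "\n" (((PySem.Str.splitlines s).foldl pvStepA ([], false)).1) = _
  rw [h]
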